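-- pv_equiv track=rewrite | github.com/frombread/Algorithm | 프로그래머스/unrated/135808. 과일 장수/과일 장수.py | solution
-- ===== SOURCE A (Python) =====
-- def solution(k, m, score):
--     score.sort()
--     answer = 0
--     while len(score) >= m:
--         result =[]
--         for _ in range(m):
--             add_fruit = score.pop()
--             result.append(add_fruit)
--
--         answer += (min(result) * m)
--     return answer
-- ===== SOURCE B (Python) =====
-- def solution(k, m, score):
--     score.sort()
--     r = len(score) % m
--     answer = 0
--     for i in range(r, len(score), m):
--         answer += score[i]
--     answer *= m
--     del score[r:]
--     return answer
-- ===== Notes on version B (the rewrite author's own statement) =====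
-- stated objective: simpler
-- what changed: A repeatedly pops each m-element group off the sorted list, rebuilds a group list and takes its min; B sorts once and directly sums the stride elements score[len%m], score[len%m+m], ... (each full group's minimum) in one pass, then truncates the list to reproduce A's in-place mutation.
import Mathlib
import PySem

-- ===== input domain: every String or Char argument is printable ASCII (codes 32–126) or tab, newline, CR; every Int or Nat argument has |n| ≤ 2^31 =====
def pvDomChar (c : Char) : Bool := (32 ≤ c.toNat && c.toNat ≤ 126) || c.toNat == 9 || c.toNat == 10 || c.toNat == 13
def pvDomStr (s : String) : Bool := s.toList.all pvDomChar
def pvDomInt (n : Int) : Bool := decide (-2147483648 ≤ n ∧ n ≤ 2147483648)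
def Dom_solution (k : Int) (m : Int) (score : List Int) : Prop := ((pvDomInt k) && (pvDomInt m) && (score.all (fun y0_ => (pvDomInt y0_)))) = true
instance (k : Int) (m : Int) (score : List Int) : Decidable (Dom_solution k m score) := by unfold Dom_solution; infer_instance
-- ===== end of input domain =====

-- B replaces A's group-by-group pop loop with a direct stride sum over the ascending sort
-- (objective: simpler). Both A and B mutate `score` in place identically (sort, then keep
-- only the leftover len%m smallest elements); the equivalence proved here is about the
-- RETURN value only.

-- ===== PORT A =====
-- inner 'for _ in range(m): add_fruit = score.pop(); result.append(add_fruit)'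
def popLoopA (n : Nat) (score : List Int) (result : List Int) : List Int × List Int :=
  match n with
  | 0 => (score, result)
  | n + 1 =>
    match PySem.List.pop? score with
    | some (x, rest) => popLoopA n rest (result ++ [x])
    | none => (score, result)   -- unreachable under the loop guard (len(score) ≥ m ≥ n+1)

theorem popLoopA_spec (n : Nat) : ∀ (score result : List Int), n ≤ score.length →
    popLoopA n score result =
      (score.take (score.length - n), result ++ (score.drop (score.length - n)).reverse) := by
  induction n with
  | zero => intro score result _; simp [popLoopA]
  | succ n ih =>
    intro score result hn
    have hne : score ≠ [] := by intro h; subst h; simp at hn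
    obtain ⟨d, x, hdx⟩ : ∃ d x, score = d ++ [x] :=
      ⟨score.dropLast, score.getLast hne, (List.dropLast_append_getLast hne).symm⟩
    subst hdx
    have hlen : (d ++ [x]).length = d.length + 1 := by simp
    have hnd : n ≤ d.length := by simp at hn; omega
    rw [popLoopA, PySem.List.pop?_last]
    show popLoopA n d (result ++ [x]) = _
    rw [ih d (result ++ [x]) hnd]
    have h1 : (d ++ [x]).length - (n + 1) = d.length - n := by omega
    have h2 : d.length - n ≤ d.length := by omega
    rw [h1, List.take_append_of_le_length h2, List.drop_append_of_le_length h2]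
    simp

theorem popLoopA_fst_length_lt (m : Int) (score : List Int)
    (h : 1 ≤ m ∧ m ≤ (score.length : Int)) :
    (popLoopA m.toNat score []).1.length < score.length := by
  have hle : m.toNat ≤ score.length := by omega
  rw [popLoopA_spec m.toNat score [] hle]
  simp only [List.length_take]
  omega

-- 'while len(score) >= m: …'  (the '1 ≤ m' conjunct is a totality guard only: for m ≤ 0 the
-- Python loop body raises ValueError on min([]), which Pre_solution excludes)
def solutionLoopA (m : Int) (score : List Int) (answer : Int) : Int :=
  if h : 1 ≤ m ∧ m ≤ (score.length : Int) then
    let p := popLoopA m.toNat score []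
    solutionLoopA m p.1 (answer + ((PySem.List.min? p.2 (fun x => x)).getD 0) * m)
  else answer
termination_by score.length
decreasing_by exact popLoopA_fst_length_lt m score h

def solution (k : Int) (m : Int) (score : List Int) : Int :=
  solutionLoopA m (PySem.List.sorted score (fun x => x)) 0

-- ===== PORT B =====
def solution_alt (k : Int) (m : Int) (score : List Int) : Int :=
  let s := PySem.List.sorted score (fun x => x)
  let r := PySem.Int.mod (s.length : Int) m
  let answer := (PySem.List.pyRange r (s.length : Int) m).foldl
      (fun acc i => acc + PySem.List.pyGetD s i 0) 0
  answer * m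

-- ===== PRECONDITION & SPEC =====
-- Pre_ excludes exactly m ≤ 0, where the Python A raises ValueError (min of the empty group).
def Pre_solution (k : Int) (m : Int) (score : List Int) : Prop := 1 ≤ m
instance (k : Int) (m : Int) (score : List Int) : Decidable (Pre_solution k m score) := by unfold Pre_solution; infer_instance
def pvWitness_solution : Int × Int × List Int := (4, 3, [1, 2, 3, 1, 2])

def Spec_solution (k : Int) (m : Int) (score : List Int) (out : Int) : Prop := out = solution_alt k m score
instance (k : Int) (m : Int) (score : List Int) (out : Int) : Decidable (Spec_solution k m score out) := by unfold Spec_solution; infer_instance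

-- ===== CLAIM (what is proved, stated in full; the proofs are below) =====
def Claim_equal_solution : Prop := ∀ (k : Int) (m : Int) (score : List Int), Dom_solution k m score → Pre_solution k m score → Spec_solution k m score (solution k m score)

-- ===== LEMMAS AND PROOFS =====

-- the stride sum B computes, as a named helper for the proofs
def strideSum (m : Int) (s : List Int) : Int :=
  ((PySem.List.pyRange (((s.length : Int)) % m) (s.length : Int) m).map
      (fun i => PySem.List.pyGetD s i 0)).sum

theorem pyRange_stride_split (m : Int) (hm : 1 ≤ m) (n : Nat) (hn : m ≤ (n : Int)) :
    PySem.List.pyRange ((n : Int) % m) (n : Int) m =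
      PySem.List.pyRange ((n : Int) % m) ((n : Int) - m) m ++ [(n : Int) - m] := by
  have hm0 : 0 < m := hm
  set r : Int := (n : Int) % m with hr
  have hr0 : 0 ≤ r := Int.emod_nonneg _ (by omega)
  have hrm : r < m := Int.emod_lt_of_pos _ hm0
  have hdiv : (n : Int) - r = m * ((n : Int) / m) := by
    have := Int.emod_add_ediv (n : Int) m
    omega
  set t : Int := (n : Int) / m with ht
  have ht1 : 1 ≤ t := by
    rcases Int.lt_or_le t 1 with h | h
    · exfalso; nlinarith
    · exact h
  have hq : ((n : Int) - r + m - 1) / m = t := by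
    have : (n : Int) - r + m - 1 = (m - 1) + t * m := by linear_combination hdiv
    rw [this, Int.add_mul_ediv_right _ _ (by omega : m ≠ 0),
        Int.ediv_eq_zero_of_lt (by omega) (by omega)]
    omega
  have hq' : ((n : Int) - m - r + m - 1) / m = t - 1 := by
    have : (n : Int) - m - r + m - 1 = (m - 1) + (t - 1) * m := by linear_combination hdiv
    rw [this, Int.add_mul_ediv_right _ _ (by omega : m ≠ 0),
        Int.ediv_eq_zero_of_lt (by omega) (by omega)]
    omega
  rw [PySem.List.pyRange_of_pos _ _ hm0, PySem.List.pyRange_of_pos _ _ hm0]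
  have hlt1 : r < (n : Int) := by omega
  rw [if_pos hlt1, hq]
  have htt : t.toNat = (t - 1).toNat + 1 := by omega
  by_cases hlt2 : r < (n : Int) - m
  · rw [if_pos hlt2, hq', htt, List.range_succ, List.map_append]
    congr 1
    simp only [List.map_cons, List.map_nil]
    congr 1
    have : ((t - 1).toNat : Int) = t - 1 := by omega
    rw [this]
    linear_combination -hdiv
  · -- exactly one group: t = 1, r = n - m
    have hreq : r = (n : Int) - m := by nlinarith
    have ht1' : t = 1 := by nlinarith
    rw [if_neg hlt2, htt, ht1']
    norm_num
    omega

theorem strideSum_lt (m : Int) (s : List Int) (hm : 1 ≤ m) (hlt : (s.length : Int) < m) :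
    strideSum m s = 0 := by
  unfold strideSum
  have : (s.length : Int) % m = (s.length : Int) :=
    Int.emod_eq_of_lt (by positivity) hlt
  rw [this, PySem.List.pyRange_of_pos _ _ (by omega : (0:Int) < m), if_neg (by omega)]
  simp

theorem strideSum_step (m : Int) (s : List Int) (hm : 1 ≤ m) (hle : m ≤ (s.length : Int)) :
    strideSum m s =
      strideSum m (s.take (s.length - m.toNat)) +
        PySem.List.pyGetD s ((s.length : Int) - m) 0 := by
  unfold strideSum
  set n := s.length with hn
  set u := s.take (n - m.toNat) with hu
  have hul : u.length = n - m.toNat := by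
    rw [hu]; simp; omega
  have hunat : ((u.length : Int)) = (n : Int) - m := by rw [hul]; omega
  have hmod : ((u.length : Int)) % m = (n : Int) % m := by
    rw [hunat]; exact Int.sub_emod_right _ _
  rw [hmod, hunat, pyRange_stride_split m hm n hle, List.map_append, List.sum_append]
  congr 1
  · congr 1
    apply List.map_congr_left
    intro i hi
    rw [PySem.List.mem_pyRange_iff_of_pos (by omega : (0:Int) < m)] at hi
    obtain ⟨hi1, hi2, _⟩ := hi
    have hi0 : 0 ≤ i := le_trans (Int.emod_nonneg _ (by omega)) hi1
    have hiu : i < (u.length : Int) := by omega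
    have his : i < (n : Int) := by omega
    rw [PySem.List.pyGetD_eq_getElem _ _ hi0 (by omega),
        PySem.List.pyGetD_eq_getElem _ _ hi0 (by omega)]
    simp [hu]
  · simp

-- min of the popped (reversed) block is the head of the block, since s is sorted
theorem min_block (s : List Int) (hs : s.Pairwise (· ≤ ·)) (j : Nat) (hj : j < s.length) :
    ((PySem.List.min? (s.drop j).reverse (fun x => x)).getD 0) = s[j] := by
  have hne : (s.drop j).reverse ≠ [] := by
    simp [List.drop_eq_nil_iff]; omega
  obtain ⟨v, hv⟩ : ∃ v, PySem.List.min? (s.drop j).reverse (fun x => x) = some v := by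
    cases h : PySem.List.min? (s.drop j).reverse (fun x => x) with
    | none => exact absurd ((PySem.List.min?_eq_none_iff _ _).mp h) hne
    | some v => exact ⟨v, rfl⟩
  rw [hv]; simp only [Option.getD_some]
  have hmem : v ∈ s.drop j := by
    have := PySem.List.min?_mem hv; simpa using this
  have hhead : s[j] ∈ (s.drop j).reverse := by
    simp only [List.mem_reverse]
    have : s[j] = (s.drop j)[0]'(by simp; omega) := by simp
    rw [this]; exact List.getElem_mem _
  have h1 : v ≤ s[j] := PySem.List.min?_isMin hv _ hhead
  have h2 : s[j] ≤ v := by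
    obtain ⟨i, hi, hiv⟩ := List.getElem_of_mem hmem
    rw [List.getElem_drop] at hiv
    rcases Nat.eq_zero_or_pos i with h0 | h0
    · subst h0; simp at hiv; omega
    · have := List.pairwise_iff_getElem.mp hs j (j + i) hj (by simp at hi; omega) (by omega)
      omega
  omega

theorem solutionLoopA_eq (m : Int) (hm : 1 ≤ m) :
    ∀ (n : Nat) (s : List Int), s.length = n → s.Pairwise (· ≤ ·) → ∀ (a : Int),
      solutionLoopA m s a = a + strideSum m s * m := by
  intro n
  induction n using Nat.strong_induction_on with
  | _ n ih =>
    intro s hlen hs a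
    by_cases h : m ≤ (s.length : Int)
    · rw [solutionLoopA, dif_pos ⟨hm, h⟩]
      show solutionLoopA m (popLoopA m.toNat s []).1
          (a + ((PySem.List.min? (popLoopA m.toNat s []).2 (fun x => x)).getD 0) * m) =
          a + strideSum m s * m
      have hle : m.toNat ≤ s.length := by omega
      have hps := popLoopA_spec m.toNat s [] hle
      set j := s.length - m.toNat with hj
      have hjlt : j < s.length := by omega
      have hu : (popLoopA m.toNat s []).1 = s.take j := by rw [hps]
      have hv : (popLoopA m.toNat s []).2 = (s.drop j).reverse := by rw [hps]; simp
      have htake : (s.take j).Sublist s := List.take_sublist _ _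
      have hlt : (s.take j).length < n := by simp; omega
      rw [hu, hv, min_block s hs j hjlt,
          ih (s.take j).length hlt (s.take j) rfl (hs.sublist htake) _,
          strideSum_step m s hm h]
      have : PySem.List.pyGetD s ((s.length : Int) - m) 0 = s[j] := by
        rw [PySem.List.pyGetD_eq_getElem _ _ (by omega) (by omega)]
        congr 1; omega
      rw [this]; ring
    · rw [solutionLoopA, dif_neg (by omega), strideSum_lt m s hm (by omega)]
      ring

-- ===== VERDICT (by name: the statement is the Claim_ definition above) =====
theorem solution_spec : Claim_equal_solution := by
  intro k m score _ hpre
  unfold Spec_solution solution solution_alt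
  have hm : 1 ≤ m := hpre
  set s := PySem.List.sorted score (fun x => x) with hsdef
  have hs : s.Pairwise (· ≤ ·) := PySem.List.sorted_pairwise score (fun x => x)
  show solutionLoopA m s 0 =
      ((PySem.List.pyRange (PySem.Int.mod ((s.length : Int)) m) ((s.length : Int)) m).foldl
        (fun acc i => acc + PySem.List.pyGetD s i 0) 0) * m
  rw [solutionLoopA_eq m hm s.length s rfl hs 0, PySem.List.foldl_add,
      PySem.Int.mod_eq_emod_of_pos (by omega : (0:Int) < m)]
  unfold strideSum
  ring
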